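-- pv_equiv track=rewrite | github.com/aceiii/ace-everybodycodes | 2024/02/part3.py | find_scales
-- ===== SOURCE A (Python) =====
-- def line_horizontal(lines, pos, n):
--     x, y = pos
--     w = len(lines[y])
--     return [((x+i)%w, y) for i in range(n)]
--
-- def line_vertical(lines, pos, n):
--     x, y = pos
--     h = len(lines)
--     res = [(x,y+i) for i in range(n) if y+i < h]
--     return res
--
-- def word_from(lines, positions):
--     chars = []
--     for (x,y) in positions:
--         chars.append(lines[y][x])
--     return "".join(chars)
--
-- def words_at(lines, pos, n):
--     hor = line_horizontal(lines, pos, n)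
--     hor_word = word_from(lines, hor)
--     yield hor_word, hor
--
--     ver = line_vertical(lines, pos, n)
--     ver_word = word_from(lines, ver)
--     yield ver_word, ver
--
-- def find_runes_at(pos, words, lines):
--     s = set()
--     for word in words:
--         for rune, scales in words_at(lines, pos, len(word)):
--             if rune == word:
--                 s = s.union(scales)
--     return s
--
-- def find_scales(words, lines):
--     word_set = set()
--     scale_set = set()
--
--     for word in words:
--         word_set.add(word)
--         word_set.add(word[::-1])
--
--     for y,line in enumerate(lines):
--         for x in range(len(line)):
--             scale_set = scale_set.union(find_runes_at((x, y), word_set, lines))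
--
--     return scale_set
-- ===== SOURCE B (Python) =====
-- def occurrences(s, p):
--     # all start indices of p in s, via the C-level substring search
--     res = set()
--     i = s.find(p)
--     while i >= 0:
--         res.add(i)
--         i = s.find(p, i + 1)
--     return res
--
-- def find_scales(words, lines):
--     # Two-phase search: (1) for every pattern, find all its occurrence starts
--     # in each row (row repeated enough times for circular matches) and in each
--     # column string (short rows padded with a '\x00' sentinel) using str.find;
--     # (2) walk the cells emitting matched positions via O(1) set-membership tests.
--     pats = list(dict.fromkeys(v for w in words for v in (w, w[::-1])))
--     maxw = max((len(line) for line in lines), default=0)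
--     cols = [''.join(line[x] if x < len(line) else '\x00' for line in lines)
--             for x in range(maxw)]
--     hocc = [[occurrences(line * (len(p) // len(line) + 2), p) if line else set()
--              for p in pats] for line in lines]
--     vocc = [[occurrences(col, p) for p in pats] for col in cols]
--     found = set()
--     for y, line in enumerate(lines):
--         w = len(line)
--         for x in range(w):
--             for pi in range(len(pats)):
--                 if x in hocc[y][pi]:
--                     for k in range(len(pats[pi])):
--                         found.add(((x + k) % w, y))
--                 if y in vocc[x][pi]:
--                     for k in range(len(pats[pi])):
--                         found.add((x, y + k))
--     return found
-- ===== Notes on version B (the rewrite author's own statement) =====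
-- stated objective: faster
-- what changed: A checks every (cell, word) pair by building position lists and extracting strings; B is a two-phase search: it precomputes, per pattern, all occurrence starts in each row (repeated for circular wrap) and in each sentinel-padded column string via str.find, then one emission pass over cells uses O(1) set-membership tests instead of per-cell character comparison.
import Mathlib
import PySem

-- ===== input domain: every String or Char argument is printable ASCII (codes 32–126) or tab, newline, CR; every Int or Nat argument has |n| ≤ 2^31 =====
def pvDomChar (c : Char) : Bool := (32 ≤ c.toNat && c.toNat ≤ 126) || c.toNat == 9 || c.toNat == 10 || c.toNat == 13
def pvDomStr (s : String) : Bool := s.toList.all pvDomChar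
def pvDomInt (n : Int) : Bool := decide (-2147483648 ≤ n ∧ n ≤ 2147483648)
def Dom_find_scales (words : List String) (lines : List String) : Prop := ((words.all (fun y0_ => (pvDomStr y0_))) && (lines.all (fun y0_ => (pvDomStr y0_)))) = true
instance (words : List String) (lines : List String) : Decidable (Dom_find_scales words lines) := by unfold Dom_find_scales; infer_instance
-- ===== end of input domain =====

-- B replaces A's per-cell, per-word string extraction by a two-phase search: per pattern,
-- all occurrence starts in each (repeated) row and each sentinel-padded column string are
-- precomputed with str.find, and one emission pass over the cells uses set-membership tests
-- (objective: faster; equivalence proved on Pre_, the inputs where the Python A does not raise).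

-- ===== PORT A =====
-- Python strings are compared through their character lists; word_from returns the
-- List Char of "".join(chars).
def line_horizontal (lines : List String) (pos : Int × Int) (n : Int) : List (Int × Int) :=
  let x := pos.1
  let y := pos.2
  let w := PySem.Str.len (PySem.List.pyGetD lines y "")
  (PySem.List.pyRange 0 n 1).map (fun i => (PySem.Int.mod (x + i) w, y))

def line_vertical (lines : List String) (pos : Int × Int) (n : Int) : List (Int × Int) :=
  let x := pos.1
  let y := pos.2
  let h : Int := lines.length
  ((PySem.List.pyRange 0 n 1).filter (fun i => decide (y + i < h))).map (fun i => (x, y + i))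

-- lines[y][x]; the pyGetD defaults are only reached where Python raises (excluded by Pre_).
def word_from (lines : List String) (positions : List (Int × Int)) : List Char :=
  positions.foldl
    (fun chars p => chars ++ [PySem.List.pyGetD (PySem.List.pyGetD lines p.2 "").toList p.1 ' ']) []

-- the generator words_at, materialized as its two yielded pairs
def words_at (lines : List String) (pos : Int × Int) (n : Int) :
    List (List Char × List (Int × Int)) :=
  let hor := line_horizontal lines pos n
  let ver := line_vertical lines pos n
  [(word_from lines hor, hor), (word_from lines ver, ver)]

def find_runes_at (pos : Int × Int) (words : PySem.Set String) (lines : List String) :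
    PySem.Set (Int × Int) :=
  words.foldl
    (fun s word =>
      (words_at lines pos (PySem.Str.len word)).foldl
        (fun s rs => if rs.1 = word.toList then PySem.Set.union s rs.2 else s) s)
    PySem.Set.empty

def find_scales (words : List String) (lines : List String) : List (Int × Int) :=
  -- word[::-1] is the reversed string
  let word_set : PySem.Set String :=
    words.foldl
      (fun ws word =>
        PySem.Set.add (PySem.Set.add ws word) (String.ofList word.toList.reverse))
      PySem.Set.empty
  (PySem.List.enumerate lines 0).foldl
    (fun scale_set yl =>
      (PySem.List.pyRange 0 (PySem.Str.len yl.2) 1).foldl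
        (fun sc x => PySem.Set.union sc (find_runes_at (x, yl.1) word_set lines)) scale_set)
    PySem.Set.empty

-- ===== PORT B =====
-- occurrences(s, p): all start indices of p in s, via repeated s.find(p, i+1)
-- (fuel only makes the while-loop total: each found index is strictly larger than
-- the previous one, so s.length + 2 rounds always suffice).
def occGo (s p : List Char) : Nat → Int → PySem.Set Int → PySem.Set Int
  | 0, _, res => res
  | fuel+1, i, res =>
    if 0 ≤ i then
      occGo s p fuel (PySem.Chars.findFrom s p (i+1) none) (PySem.Set.add res i)
    else res

def occurrences (s p : List Char) : PySem.Set Int :=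
  occGo s p (s.length + 2) (PySem.Chars.find s p) PySem.Set.empty

def find_scales_alt (words : List String) (lines : List String) : List (Int × Int) :=
  let pats := PySem.List.dedup (words.flatMap (fun w => [w, String.ofList w.toList.reverse]))
  -- max((len(line) for line in lines), default=0)
  let maxw : Int :=
    match PySem.List.max? (lines.map PySem.Str.len) (fun v => v) with
    | some m => m
    | none => 0
  -- cols[x] = ''.join(line[x] if x < len(line) else '\x00' for line in lines)
  let cols : List (List Char) :=
    (PySem.List.pyRange 0 maxw 1).map (fun x =>
      lines.map (fun line =>
        if x < PySem.Str.len line then PySem.List.pyGetD line.toList x ' ' else Char.ofNat 0))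
  let hocc : List (List (PySem.Set Int)) :=
    lines.map (fun line =>
      pats.map (fun p =>
        if line.toList ≠ [] then
          occurrences
            (PySem.List.pyRepeat line.toList
              (PySem.Int.floordiv (PySem.Str.len p) (PySem.Str.len line) + 2)) p.toList
        else PySem.Set.empty))
  let vocc : List (List (PySem.Set Int)) :=
    cols.map (fun col => pats.map (fun p => occurrences col p.toList))
  (PySem.List.enumerate lines 0).foldl
    (fun found yl =>
      (PySem.List.pyRange 0 (PySem.Str.len yl.2) 1).foldl
        (fun found x =>
          (PySem.List.pyRange 0 (pats.length : Int) 1).foldl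
            (fun found pi =>
              let p := PySem.List.pyGetD pats pi ""
              let found :=
                if PySem.Set.contains
                    (PySem.List.pyGetD (PySem.List.pyGetD hocc yl.1 []) pi PySem.Set.empty) x then
                  (PySem.List.pyRange 0 (PySem.Str.len p) 1).foldl
                    (fun f k => PySem.Set.add f (PySem.Int.mod (x + k) (PySem.Str.len yl.2), yl.1))
                    found
                else found
              if PySem.Set.contains
                  (PySem.List.pyGetD (PySem.List.pyGetD vocc x []) pi PySem.Set.empty) yl.1 then
                (PySem.List.pyRange 0 (PySem.Str.len p) 1).foldl
                  (fun f k => PySem.Set.add f (x, yl.1 + k)) found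
              else found)
            found)
        found)
    PySem.Set.empty

-- ===== PRECONDITION & SPEC =====
-- Pre_ excludes exactly the inputs on which the Python A raises IndexError: word_from reads
-- lines[y+i][x] below a longer row, so every row within (longest word length) below a nonempty
-- row must be at least as long as it.
def Pre_find_scales (words : List String) (lines : List String) : Prop :=
  ∀ y ∈ List.range lines.length, ∀ z ∈ List.range lines.length,
    y < z → (∃ w ∈ words, z - y < w.toList.length) →
    (lines.getD y "").toList.length ≤ (lines.getD z "").toList.length
instance (words : List String) (lines : List String) : Decidable (Pre_find_scales words lines) := by
  unfold Pre_find_scales; infer_instance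

def pvWitness_find_scales : List String × List String := (["ab"], ["ab", "ba"])

def Spec_find_scales (words : List String) (lines : List String) (out : List (Int × Int)) : Prop :=
  out = find_scales_alt words lines
instance (words : List String) (lines : List String) (out : List (Int × Int)) :
    Decidable (Spec_find_scales words lines out) := by unfold Spec_find_scales; infer_instance

-- ===== CLAIM (what is proved, stated in full; the proofs are below) =====
def Claim_equal_find_scales : Prop :=
  ∀ (words : List String) (lines : List String), Dom_find_scales words lines →
    Pre_find_scales words lines → Spec_find_scales words lines (find_scales words lines)

-- ===== LEMMAS AND PROOFS =====

theorem pv_union_eq_update {α : Type} [BEq α] (s : PySem.Set α) (t : List α) :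
    PySem.Set.union s t = PySem.Set.update s t := rfl

theorem pv_update_ite {α : Type} [BEq α] (c : Prop) [Decidable c] (s : PySem.Set α) (L : List α) :
    (if c then PySem.Set.update s L else s) = PySem.Set.update s (if c then L else []) := by
  split_ifs with h
  · rfl
  · rw [PySem.Set.update_nil]

theorem pv_map_eq_iff (f : Int → Char) (L : List Char) :
    ((PySem.List.pyRange 0 (L.length : Int) 1).map f = L) ↔
    ((PySem.List.pyRange 0 (L.length : Int) 1).all
      (fun k => f k == PySem.List.pyGetD L k ' ') = true) := by
  rw [List.all_eq_true]
  constructor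
  · intro h k hk
    rw [PySem.List.mem_pyRange_one] at hk
    obtain ⟨hk0, hkl⟩ := hk
    have hkn : k.toNat < L.length := by omega
    have hke : k = (k.toNat : Int) := by omega
    have hlen : (PySem.List.pyRange 0 (L.length : Int) 1).length = L.length := by
      rw [PySem.List.length_pyRange_one]; omega
    have hmap : (List.map f (PySem.List.pyRange 0 (L.length : Int) 1))[k.toNat]'(by
        rw [List.length_map, hlen]; exact hkn) = L[k.toNat]'hkn := by
      congr 1
    rw [List.getElem_map, PySem.List.getElem_pyRange_one] at hmap
    rw [hke, PySem.List.pyGetD_natCast, beq_iff_eq, List.getD_eq_getElem L ' ' hkn]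
    simpa using hmap
  · intro h
    apply List.ext_getElem
    · rw [List.length_map, PySem.List.length_pyRange_one]; omega
    · intro i h1 h2
      rw [List.getElem_map, PySem.List.getElem_pyRange_one]
      have hi : ((i : Int)) ∈ PySem.List.pyRange 0 (L.length : Int) 1 := by
        rw [PySem.List.mem_pyRange_one]
        constructor
        · omega
        · rw [List.length_map, PySem.List.length_pyRange_one] at h1; omega
      have := h _ hi
      rw [beq_iff_eq, PySem.List.pyGetD_natCast] at this
      rw [List.getD_eq_getElem L ' ' (by simpa using h2)] at this
      rw [show (0 : Int) + (i : Int) = (i : Int) by omega, this]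

theorem pv_filter_range (y h n : Int) (hyh : y < h) :
    (PySem.List.pyRange 0 n 1).filter (fun i => decide (y + i < h)) =
    PySem.List.pyRange 0 (min n (h - y)) 1 := by
  by_cases hc : n ≤ h - y
  · rw [min_eq_left hc, List.filter_eq_self]
    intro a ha
    rw [PySem.List.mem_pyRange_one] at ha
    simp only [decide_eq_true_eq]
    omega
  · rw [min_eq_right (by omega : h - y ≤ n),
        PySem.List.pyRange_one_append 0 (h - y) n (by omega) (by omega),
        List.filter_append]
    have h1 : (PySem.List.pyRange 0 (h - y) 1).filter (fun i => decide (y + i < h)) =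
        PySem.List.pyRange 0 (h - y) 1 := by
      rw [List.filter_eq_self]
      intro a ha
      rw [PySem.List.mem_pyRange_one] at ha
      simp only [decide_eq_true_eq]
      omega
    have h2 : (PySem.List.pyRange (h - y) n 1).filter (fun i => decide (y + i < h)) = [] := by
      rw [List.filter_eq_nil_iff]
      intro a ha
      rw [PySem.List.mem_pyRange_one] at ha
      simp only [decide_eq_true_eq]
      omega
    rw [h1, h2, List.append_nil]

theorem pv_foldl_update {α β : Type} [BEq α] (g : PySem.Set α → β → PySem.Set α)
    (F : β → List α) (hg : ∀ s w, g s w = PySem.Set.update s (F w)) :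
    ∀ (W : List β) (s : PySem.Set α), W.foldl g s = PySem.Set.update s (W.flatMap F) := by
  intro W
  induction W with
  | nil => intro s; simp [PySem.Set.update_nil]
  | cons w W ih =>
    intro s
    simp only [List.foldl_cons, List.flatMap_cons, hg]
    rw [PySem.Set.update_append, ih]

theorem pv_union_foldl {α β : Type} [BEq α] [LawfulBEq α] (g : PySem.Set α → β → PySem.Set α)
    (F : β → List α) (hg : ∀ s w, g s w = PySem.Set.update s (F w))
    (W : List β) (sc : PySem.Set α) :
    PySem.Set.union sc (W.foldl g PySem.Set.empty) = W.foldl g sc := by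
  rw [pv_foldl_update g F hg, pv_foldl_update g F hg]
  show PySem.Set.update sc (PySem.Set.update PySem.Set.empty (W.flatMap F)) = _
  have : PySem.Set.update PySem.Set.empty (W.flatMap F) = PySem.Set.ofList (W.flatMap F) := rfl
  rw [this, PySem.Set.update_eq_append_filter, PySem.Set.update_eq_append_filter,
      PySem.Set.ofList_ofList]

-- the per-word contribution of a cell (x, y): horizontal then vertical positions, when they match
def pvF (lines : List String) (x y : Int) (p : String) : List (Int × Int) :=
  (if ((PySem.List.pyRange 0 (p.toList.length : Int) 1).all
        (fun j => PySem.List.pyGetD (PySem.List.pyGetD lines y "").toList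
            (PySem.Int.mod (x + j) ((PySem.List.pyGetD lines y "").toList.length : Int)) ' '
          == PySem.List.pyGetD p.toList j ' ')) = true
   then (PySem.List.pyRange 0 (p.toList.length : Int) 1).map
          (fun i => (PySem.Int.mod (x + i) ((PySem.List.pyGetD lines y "").toList.length : Int), y))
   else []) ++
  (if (y + (p.toList.length : Int) ≤ (lines.length : Int) ∧
       ((PySem.List.pyRange 0 (p.toList.length : Int) 1).all
        (fun j => PySem.List.pyGetD (PySem.List.pyGetD lines (y + j) "").toList x ' '
          == PySem.List.pyGetD p.toList j ' ')) = true)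
   then (PySem.List.pyRange 0 (p.toList.length : Int) 1).map (fun i => (x, y + i))
   else [])

theorem pv_stepA (lines : List String) (k : Nat) (hk : k < lines.length) (x : Int)
    (p : String) (s : PySem.Set (Int × Int)) :
    (words_at lines (x, (k : Int)) (PySem.Str.len p)).foldl
      (fun s rs => if rs.1 = p.toList then PySem.Set.union s rs.2 else s) s
    = PySem.Set.update s (pvF lines x (k : Int) p) := by
  simp only [words_at, line_horizontal, line_vertical, word_from, List.foldl_cons,
    List.foldl_nil, List.nil_append, PySem.List.foldl_append_singleton_eq_map, List.map_map,
    PySem.Str.len_eq, pv_union_eq_update, Function.comp_def]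
  rw [pv_filter_range (k : Int) (lines.length : Int) (p.toList.length : Int)
        (by exact_mod_cast hk)]
  by_cases hyn : ((k : Int) + (p.toList.length : Int) ≤ (lines.length : Int))
  · rw [min_eq_left (by omega)]
    simp only [pv_map_eq_iff]
    unfold pvF
    simp only [hyn, true_and]
    rw [pv_update_ite, pv_update_ite, ← PySem.Set.update_append]
  · have hne : List.map (fun i => PySem.List.pyGetD (PySem.List.pyGetD lines ((k : Int) + i) "").toList x ' ')
        (PySem.List.pyRange 0 (min (p.toList.length : Int) ((lines.length : Int) - (k : Int))) 1) ≠ p.toList := by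
      intro hc
      have := congrArg List.length hc
      simp only [List.length_map, PySem.List.length_pyRange_one] at this
      omega
    rw [if_neg hne]
    unfold pvF
    simp only [pv_map_eq_iff, hyn, false_and, if_false, List.append_nil]
    rw [pv_update_ite]

theorem pv_foldl_add_eq_update {α β : Type} [BEq α] (L : List β) (g : β → α) (s : PySem.Set α) :
    L.foldl (fun f j => PySem.Set.add f (g j)) s = PySem.Set.update s (L.map g) := by
  show _ = (L.map g).foldl PySem.Set.add s
  rw [List.foldl_map]

-- ---------- B-side: characterization of occurrences ----------

-- the (sorted) list of occurrence starts of p in s that are >= k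
def pvOccList (s p : List Char) (k : Nat) : List Nat :=
  (List.range (s.length + 1)).filter (fun j => decide (k ≤ j ∧ p <+: s.drop j))

theorem pv_findFrom_past (s p : List Char) (m : Int) (hm : (s.length : Int) < m) :
    PySem.Chars.findFrom s p m none = -1 := by
  simp only [PySem.Chars.findFrom]
  rw [if_neg (show ¬ m < 0 by omega)]
  rw [if_pos (show (s.length : Int) < m from hm)]

theorem pv_occList_decomp (s p : List Char) (k rn : Nat) (hkr : k ≤ rn) (hrl : rn ≤ s.length)
    (hP : p <+: s.drop rn) (hmin : ∀ j, k ≤ j → j < rn → ¬ p <+: s.drop j) :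
    pvOccList s p k = rn :: pvOccList s p (rn + 1) := by
  unfold pvOccList
  have hsplit : List.range (s.length + 1)
      = List.range rn ++ (List.range (s.length + 1 - rn)).map (fun i => rn + i) := by
    rw [← List.range_add]
    congr 1
    omega
  rw [hsplit, List.filter_append, List.filter_append]
  have h1 : (List.range rn).filter (fun j => decide (k ≤ j ∧ p <+: s.drop j)) = [] := by
    rw [List.filter_eq_nil_iff]
    intro j hj
    rw [List.mem_range] at hj
    simp only [decide_eq_true_eq, not_and]
    intro hkj
    exact hmin j hkj hj
  have h1' : (List.range rn).filter (fun j => decide (rn + 1 ≤ j ∧ p <+: s.drop j)) = [] := by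
    rw [List.filter_eq_nil_iff]
    intro j hj
    rw [List.mem_range] at hj
    simp only [decide_eq_true_eq, not_and]
    omega
  rw [h1, h1', List.nil_append, List.nil_append]
  have hlr : s.length + 1 - rn = (s.length - rn) + 1 := by omega
  rw [hlr, List.range_succ_eq_map]
  simp only [List.map_cons, List.map_map, List.filter_cons]
  rw [if_pos (by simp only [decide_eq_true_eq]; exact ⟨by omega, by simpa using hP⟩)]
  rw [if_neg (by simp only [decide_eq_true_eq]; omega)]
  congr 1
  apply List.filter_congr
  intro j hj
  rw [List.mem_map] at hj
  obtain ⟨i, _, rfl⟩ := hj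
  simp only [Function.comp]
  simp only [decide_eq_decide]
  constructor <;> rintro ⟨ha, hb⟩ <;> exact ⟨by omega, hb⟩

theorem pv_occGo_spec (s p : List Char) :
    ∀ (fuel k : Nat) (res : PySem.Set Int), k ≤ s.length → s.length + 1 - k < fuel →
    occGo s p fuel (PySem.Chars.findFrom s p (k : Int) none) res
      = PySem.Set.update res ((pvOccList s p k).map (Int.ofNat)) := by
  intro fuel
  induction fuel with
  | zero => intro k res hk hf; omega
  | succ fuel ih =>
    intro k res hk hf
    by_cases hneg : PySem.Chars.findFrom s p (k : Int) none = -1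
    · rw [hneg]
      show (if (0:Int) ≤ -1 then _ else res) = _
      rw [if_neg (by omega)]
      have hinf : ¬ p <:+: s.drop k := by
        rw [← PySem.Chars.findFrom_natCast_eq_neg_one_iff s p k hk]
        exact hneg
      have hnil : pvOccList s p k = [] := by
        unfold pvOccList
        rw [List.filter_eq_nil_iff]
        intro j hj
        simp only [decide_eq_true_eq, not_and]
        intro hkj hpre
        apply hinf
        have hex : ∃ j', p <+: (s.drop k).drop j' :=
          ⟨j - k, by rw [List.drop_drop, show k + (j - k) = j by omega]; exact hpre⟩
        rw [PySem.Chars.exists_prefix_drop_iff_isIn, PySem.Chars.isIn_iff_infix] at hex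
        exact hex
      rw [hnil]
      simp [PySem.Set.update_nil]
    · -- a first occurrence r ≥ k exists
      obtain ⟨hkr, hpre, hmin⟩ := PySem.Chars.findFrom_natCast_spec s p k hk hneg
      have hrle : PySem.Chars.findFrom s p (k : Int) none ≤ (s.length : Int) := by
        rw [PySem.Chars.findFrom_natCast s p k hk]
        split
        · omega
        · have := PySem.Chars.find_le_length (s.drop k) p
          rw [List.length_drop] at this
          omega
      obtain ⟨rn, hrneq⟩ : ∃ rn : Nat, PySem.Chars.findFrom s p (k : Int) none = (rn : Int) :=
        ⟨(PySem.Chars.findFrom s p (k : Int) none).toNat, by omega⟩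
      rw [hrneq] at hkr hpre hmin ⊢
      have hrn' : rn ≤ s.length := by omega
      simp only [Int.toNat_natCast] at hpre hmin
      have hdecomp := pv_occList_decomp s p k rn (by omega) hrn' hpre
        (fun j hkj hjr => hmin j hkj hjr)
      show (if (0:Int) ≤ (rn : Int) then _ else _) = _
      rw [if_pos (by omega)]
      rw [hdecomp, List.map_cons, PySem.Set.update_cons]
      by_cases hend : rn < s.length
      · have hcast : ((rn : Int)) + 1 = (((rn + 1 : Nat)) : Int) := by omega
        rw [hcast, ih (rn + 1) _ (by omega) (by omega)]
        rfl
      · -- rn = s.length : the next find starts past the end and returns -1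
        have hpast : PySem.Chars.findFrom s p ((rn : Int) + 1) none = -1 :=
          pv_findFrom_past s p ((rn : Int) + 1) (by omega)
        rw [hpast]
        have hnil2 : pvOccList s p (rn + 1) = [] := by
          unfold pvOccList
          rw [List.filter_eq_nil_iff]
          intro j hj
          rw [List.mem_range] at hj
          simp only [decide_eq_true_eq, not_and]
          omega
        rw [hnil2, List.map_nil, PySem.Set.update_nil]
        cases fuel with
        | zero => omega
        | succ f =>
          show (if (0:Int) ≤ -1 then _ else _) = _
          rw [if_neg (by omega)]
          rfl

theorem pv_occ_contains (s p : List Char) (xn : Nat) :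
    PySem.Set.contains (occurrences s p) (xn : Int) = true ↔
      (xn ≤ s.length ∧ p <+: s.drop xn) := by
  unfold occurrences
  have h0 : PySem.Chars.find s p = PySem.Chars.findFrom s p ((0 : Nat) : Int) none := by
    rw [Nat.cast_zero, PySem.Chars.findFrom_zero]
  rw [h0, pv_occGo_spec s p (s.length + 2) 0 PySem.Set.empty (by omega) (by omega)]
  have : PySem.Set.update PySem.Set.empty ((pvOccList s p 0).map Int.ofNat)
      = PySem.Set.ofList ((pvOccList s p 0).map Int.ofNat) := rfl
  rw [this, PySem.Set.contains_iff, PySem.Set.mem_ofList, List.mem_map]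
  constructor
  · rintro ⟨j, hj, hcast⟩
    unfold pvOccList at hj
    rw [List.mem_filter, List.mem_range] at hj
    obtain ⟨hjr, hjp⟩ := hj
    simp only [decide_eq_true_eq] at hjp
    have : j = xn := by
      have : (j : Int) = (xn : Int) := hcast
      omega
    subst this
    exact ⟨by omega, hjp.2⟩
  · rintro ⟨hle, hpre⟩
    refine ⟨xn, ?_, rfl⟩
    unfold pvOccList
    rw [List.mem_filter, List.mem_range]
    exact ⟨by omega, by simp only [decide_eq_true_eq]; exact ⟨by omega, hpre⟩⟩

theorem pv_prefix_drop_iff (s p : List Char) (x : Nat) (hx : x ≤ s.length) :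
    p <+: s.drop x ↔
      (x + p.length ≤ s.length ∧ ∀ k, k < p.length → s.getD (x + k) ' ' = p.getD k ' ') := by
  rw [List.prefix_iff_eq_take]
  constructor
  · intro h
    have hlen := congrArg List.length h
    rw [List.length_take, List.length_drop] at hlen
    have hfit : x + p.length ≤ s.length := by omega
    refine ⟨hfit, fun k hk => ?_⟩
    have hgd := congrArg (fun l => List.getD l k ' ') h
    simp only at hgd
    rw [List.getD_eq_getElem?_getD, List.getD_eq_getElem?_getD, List.getElem?_take,
        List.getElem?_drop] at hgd
    rw [if_pos hk] at hgd
    rw [List.getD_eq_getElem?_getD, List.getD_eq_getElem?_getD]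
    exact hgd.symm
  · rintro ⟨hfit, hall⟩
    apply List.ext_getElem
    · rw [List.length_take, List.length_drop]; omega
    · intro i h1 h2
      have hi : i < p.length := h1
      have := hall i hi
      rw [List.getD_eq_getElem?_getD, List.getD_eq_getElem?_getD] at this
      rw [List.getElem?_eq_getElem hi] at this
      rw [List.getElem?_eq_getElem (by omega : x + i < s.length)] at this
      simp only [Option.getD_some] at this
      rw [List.getElem_take, List.getElem_drop]
      exact this.symm

theorem pv_all_pyRange_iff (n : Nat) (f : Int → Bool) :
    ((PySem.List.pyRange 0 (n : Int) 1).all f = true) ↔ ∀ k : Nat, k < n → f (k : Int) = true := by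
  rw [List.all_eq_true]
  constructor
  · intro h k hk
    exact h _ (by rw [PySem.List.mem_pyRange_one]; omega)
  · intro h i hi
    rw [PySem.List.mem_pyRange_one] at hi
    have : i = ((i.toNat : Nat) : Int) := by omega
    rw [this]
    exact h i.toNat (by omega)

theorem pv_pyRepeat_length (l : List Char) (m : Nat) :
    (PySem.List.pyRepeat l (m : Int)).length = m * l.length := by
  simp [PySem.List.pyRepeat, List.length_flatten, List.map_replicate, List.sum_replicate,
    smul_eq_mul]

theorem pv_pyRepeat_getD (l : List Char) (m : Nat) (j : Nat) (hj : j < m * l.length) :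
    (PySem.List.pyRepeat l (m : Int)).getD j ' ' = l.getD (j % l.length) ' ' := by
  have hw : 0 < l.length := by
    rcases Nat.eq_zero_or_pos l.length with h | h
    · rw [h, Nat.mul_zero] at hj; omega
    · exact h
  induction m generalizing j with
  | zero => omega
  | succ t ih =>
    have hrep : PySem.List.pyRepeat l ((t+1 : Nat) : Int)
        = l ++ PySem.List.pyRepeat l (t : Nat) := by
      simp [PySem.List.pyRepeat, List.replicate_succ]
    have hsm : (t+1) * l.length = t * l.length + l.length := Nat.succ_mul t l.length
    rw [hrep]
    by_cases hjw : j < l.length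
    · rw [List.getD_append _ _ _ j hjw, Nat.mod_eq_of_lt hjw]
    · have h1 : l.length ≤ j := by omega
      rw [List.getD_append_right _ _ _ j h1, ih (j - l.length) (by omega),
          Nat.mod_eq_sub_mod h1]

theorem pv_hcond (line p : List Char) (x w : Nat) (hw : w = line.length) (hx : x < w) :
    (PySem.Set.contains
      (occurrences (PySem.List.pyRepeat line (PySem.Int.floordiv (p.length : Int) (w : Int) + 2)) p)
      (x : Int) = true) ↔
    (((PySem.List.pyRange 0 (p.length : Int) 1).all
      (fun j => PySem.List.pyGetD line (PySem.Int.mod ((x : Int) + j) (w : Int)) ' '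
        == PySem.List.pyGetD p j ' ')) = true) := by
  subst hw
  have hw0 : 0 < line.length := by omega
  have hcast : PySem.Int.floordiv (p.length : Int) (line.length : Int) + 2
      = ((p.length / line.length + 2 : Nat) : Int) := by
    rw [PySem.Int.floordiv_natCast]
    push_cast
    ring
  set m : Nat := p.length / line.length + 2 with hm
  have hq : p.length < (p.length / line.length) * line.length + line.length := by
    have h1 := Nat.div_add_mod p.length line.length
    have h2 := Nat.mod_lt p.length hw0
    have h3 : line.length * (p.length / line.length) = (p.length / line.length) * line.length :=
      Nat.mul_comm _ _
    omega
  have hmlen : (PySem.List.pyRepeat line (m : Int)).length = m * line.length :=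
    pv_pyRepeat_length line m
  have hmw : m * line.length = (p.length / line.length) * line.length + 2 * line.length := by
    rw [hm, Nat.add_mul]
  have hmod : ∀ k : Nat, PySem.Int.mod ((x : Int) + (k : Int)) (line.length : Int)
      = (((x + k) % line.length : Nat) : Int) := by
    intro k
    rw [← Nat.cast_add, PySem.Int.mod_natCast]
  rw [hcast, pv_occ_contains]
  constructor
  · rintro ⟨hxle, hpre⟩
    rw [pv_prefix_drop_iff _ _ _ hxle] at hpre
    obtain ⟨hfit, hall⟩ := hpre
    rw [pv_all_pyRange_iff]
    intro k hk
    have hge := hall k hk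
    rw [pv_pyRepeat_getD line m (x + k) (by omega)] at hge
    rw [hmod k, PySem.List.pyGetD_natCast, PySem.List.pyGetD_natCast, beq_iff_eq]
    exact hge
  · intro hall
    rw [pv_all_pyRange_iff] at hall
    refine ⟨by omega, ?_⟩
    rw [pv_prefix_drop_iff _ _ _ (by omega)]
    refine ⟨by omega, fun k hk => ?_⟩
    have hge := hall k hk
    rw [hmod k, PySem.List.pyGetD_natCast, PySem.List.pyGetD_natCast, beq_iff_eq] at hge
    rw [pv_pyRepeat_getD line m (x + k) (by omega)]
    exact hge

theorem pv_pat_len (words : List String) (p : String)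
    (hp : p ∈ PySem.List.dedup (words.flatMap (fun w => [w, String.ofList w.toList.reverse]))) :
    ∃ w ∈ words, p.toList.length = w.toList.length := by
  rw [PySem.List.mem_dedup, List.mem_flatMap] at hp
  obtain ⟨w, hw, hpw⟩ := hp
  refine ⟨w, hw, ?_⟩
  simp only [List.mem_cons, List.not_mem_nil, or_false] at hpw
  rcases hpw with h | h
  · rw [h]
  · rw [h, String.toList_ofList, List.length_reverse]

theorem pv_vcond (lines : List String) (p : List Char) (x y : Nat)
    (hy : y < lines.length)
    (hxlen : ∀ k, k < p.length → y + k < lines.length → x < (lines.getD (y + k) "").toList.length) :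
    (PySem.Set.contains
      (occurrences (lines.map (fun line =>
        if (x : Int) < PySem.Str.len line then line.toList.getD x ' '
        else Char.ofNat 0)) p) (y : Int) = true) ↔
    (((y : Int) + (p.length : Int) ≤ (lines.length : Int)) ∧
     ((PySem.List.pyRange 0 (p.length : Int) 1).all
       (fun j => PySem.List.pyGetD (PySem.List.pyGetD lines ((y : Int) + j) "").toList (x : Int) ' '
         == PySem.List.pyGetD p j ' ')) = true) := by
  set f : String → Char := fun line =>
    if (x : Int) < PySem.Str.len line then line.toList.getD x ' '
    else Char.ofNat 0 with hf
  have hcl : (lines.map f).length = lines.length := List.length_map ..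
  have hstep : ∀ k : Nat, k < p.length → y + k < lines.length →
      ((lines.map f).getD (y + k) ' ' = p.getD k ' ' ↔
       (PySem.List.pyGetD (PySem.List.pyGetD lines ((y : Int) + (k : Int)) "").toList (x : Int) ' '
         == PySem.List.pyGetD p (k : Int) ' ') = true) := by
    intro k hk hyk
    have h1 : PySem.List.pyGetD lines ((y : Int) + (k : Int)) "" = lines.getD (y + k) "" := by
      rw [← Nat.cast_add, PySem.List.pyGetD_natCast]
    have hxl := hxlen k hk hyk
    have h2 : (lines.map f).getD (y + k) ' ' = f (lines.getD (y + k) "") := by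
      rw [List.getD_eq_getElem _ _ (by omega : y + k < (lines.map f).length),
          List.getElem_map, List.getD_eq_getElem _ _ (by omega : y + k < lines.length)]
    have h3 : f (lines.getD (y + k) "")
        = PySem.List.pyGetD (lines.getD (y + k) "").toList (x : Int) ' ' := by
      rw [hf, PySem.List.pyGetD_natCast]
      exact if_pos (show ((x : Nat) : Int) < PySem.Str.len (lines.getD (y + k) "") by
        rw [PySem.Str.len_eq]; exact_mod_cast hxl)
    rw [h2, h3, h1, beq_iff_eq, PySem.List.pyGetD_natCast, PySem.List.pyGetD_natCast]
  rw [pv_occ_contains, pv_prefix_drop_iff _ _ _ (by omega), pv_all_pyRange_iff, hcl]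
  constructor
  · rintro ⟨_, hfit, hall⟩
    refine ⟨by omega, fun k hk => ?_⟩
    rw [← hstep k hk (by omega)]
    exact hall k hk
  · rintro ⟨hfit, hall⟩
    refine ⟨by omega, by omega, fun k hk => ?_⟩
    rw [hstep k hk (by omega)]
    exact hall k hk

-- ===== VERDICT (by name: the statement is the Claim_ definition above) =====
theorem find_scales_spec : Claim_equal_find_scales := by
  intro words lines hdom hpre
  unfold Spec_find_scales
  unfold find_scales find_scales_alt
  have hW : (words.foldl (fun ws word => PySem.Set.add (PySem.Set.add ws word)
        (String.ofList word.toList.reverse)) PySem.Set.empty)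
      = PySem.List.dedup (words.flatMap (fun w => [w, String.ofList w.toList.reverse])) := by
    rw [PySem.List.dedup_eq_ofList, PySem.Set.ofList_eq_foldl, List.foldl_flatMap]
    rfl
  simp only []
  rw [hW]
  apply PySem.List.foldl_congr_mem
  intro sc yl hyl
  rw [PySem.List.mem_enumerate_iff] at hyl
  obtain ⟨yn, hyn, rfl⟩ := hyl
  simp only [zero_add]
  apply PySem.List.foldl_congr_mem
  intro sc' x hx
  rw [PySem.List.mem_pyRange_one] at hx
  obtain ⟨xn, rfl⟩ : ∃ xn : Nat, x = (xn : Int) := ⟨x.toNat, by omega⟩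
  have hxw : xn < lines[yn].toList.length := by
    have h2 := hx.2
    rw [PySem.Str.len_eq] at h2
    omega
  -- abbreviate the pattern list
  set pats := PySem.List.dedup (words.flatMap (fun w => [w, String.ofList w.toList.reverse]))
    with hpats
  unfold find_runes_at
  refine Eq.trans (pv_union_foldl _ (pvF lines (xn : Int) (yn : Int))
      (fun s w => pv_stepA lines yn hyn (xn : Int) w s) pats sc')
    (Eq.trans ?hA (Eq.trans
      (PySem.List.foldl_pyRange_pyGetD' pats ""
        (fun s p => PySem.Set.update s (pvF lines (xn : Int) (yn : Int) p)) sc'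
        (by norm_num : (0:Int) ≤ 0)).symm ?hB))
  case hA =>
    apply PySem.List.foldl_congr_mem
    intro s p hp
    exact pv_stepA lines yn hyn (xn : Int) p s
  case hB =>
    apply PySem.List.foldl_congr_mem
    intro acc pi hpi
    rw [PySem.List.mem_pyRange_one] at hpi
    obtain ⟨pin, rfl⟩ : ∃ pin : Nat, pi = (pin : Int) := ⟨pi.toNat, by omega⟩
    have hpin : pin < pats.length := by omega
    have hp : PySem.List.pyGetD pats (pin : Int) "" = pats[pin] := by
      rw [PySem.List.pyGetD_natCast]; exact List.getD_eq_getElem _ _ hpin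
    rw [hp]
    -- resolve the hocc lookup
    have hlook1 : PySem.List.pyGetD
        (lines.map (fun line => pats.map (fun p =>
          if line.toList ≠ [] then
            occurrences (PySem.List.pyRepeat line.toList
              (PySem.Int.floordiv (PySem.Str.len p) (PySem.Str.len line) + 2)) p.toList
          else PySem.Set.empty))) (yn : Int) []
        = pats.map (fun p =>
          if lines[yn].toList ≠ [] then
            occurrences (PySem.List.pyRepeat lines[yn].toList
              (PySem.Int.floordiv (PySem.Str.len p) (PySem.Str.len lines[yn]) + 2)) p.toList
          else PySem.Set.empty) := by
      rw [PySem.List.pyGetD_natCast,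
          List.getD_eq_getElem _ _ (by simpa using hyn), List.getElem_map]
    rw [hlook1]
    have hlook2 : PySem.List.pyGetD (pats.map (fun p =>
          if lines[yn].toList ≠ [] then
            occurrences (PySem.List.pyRepeat lines[yn].toList
              (PySem.Int.floordiv (PySem.Str.len p) (PySem.Str.len lines[yn]) + 2)) p.toList
          else PySem.Set.empty)) (pin : Int) PySem.Set.empty
        = (if lines[yn].toList ≠ [] then
            occurrences (PySem.List.pyRepeat lines[yn].toList
              (PySem.Int.floordiv (PySem.Str.len (pats[pin])) (PySem.Str.len lines[yn]) + 2))
              (pats[pin]).toList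
          else PySem.Set.empty) := by
      rw [PySem.List.pyGetD_natCast,
          List.getD_eq_getElem _ _ (by simpa using hpin), List.getElem_map]
    have hne : lines[yn].toList ≠ [] := by
      intro h
      rw [h] at hxw
      simp at hxw
    rw [hlook2, if_pos hne]
    -- resolve the vocc lookup: first the column count maxw
    obtain ⟨mv, hmv, hmvge⟩ : ∃ mv, PySem.List.max? (lines.map PySem.Str.len) (fun v => v) = some mv
        ∧ (lines[yn].toList.length : Int) ≤ mv := by
      cases hm : PySem.List.max? (lines.map PySem.Str.len) (fun v => v) with
      | none =>
        rw [PySem.List.max?_eq_none_iff] at hm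
        rw [List.map_eq_nil_iff] at hm
        subst hm
        simp at hyn
      | some m =>
        refine ⟨m, rfl, ?_⟩
        have hmem : PySem.Str.len lines[yn] ∈ lines.map PySem.Str.len :=
          List.mem_map.mpr ⟨lines[yn], List.getElem_mem hyn, rfl⟩
        have := PySem.List.max?_isMax hm _ hmem
        simpa [PySem.Str.len_eq] using this
    rw [hmv, show (match some mv with | some v => v | none => (0:Int)) = mv from rfl]
    rw [List.map_map]
    obtain ⟨mn, rfl⟩ : ∃ mn : Nat, mv = (mn : Int) := ⟨mv.toNat, by omega⟩
    have hxmn : xn < mn := by omega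
    conv_rhs => rw [PySem.List.pyGetD_map_pyRange
      ((fun col => List.map (fun p => occurrences col p.toList) pats) ∘ fun x =>
        List.map
          (fun line =>
            if x < PySem.Str.len line then PySem.List.pyGetD line.toList x ' '
            else Char.ofNat 0)
          lines)
      mn xn [] hxmn]
    simp only [Function.comp_apply]
    simp only [PySem.List.pyGetD_natCast]
    simp only [List.getD_eq_getElem _ _ (show pin < (pats.map (fun p =>
        occurrences (lines.map (fun line =>
          if (xn : Int) < PySem.Str.len line then line.toList.getD xn ' '
          else Char.ofNat 0)) p.toList)).length by simpa using hpin), List.getElem_map]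
    -- the two match conditions
    have hH := pv_hcond lines[yn].toList pats[pin].toList xn lines[yn].toList.length rfl hxw
    have hxlen : ∀ k, k < pats[pin].toList.length → yn + k < lines.length →
        xn < (lines.getD (yn + k) "").toList.length := by
      intro k hk hyk
      rcases Nat.eq_zero_or_pos k with h0 | h0
      · subst h0
        rw [Nat.add_zero, List.getD_eq_getElem _ _ hyn]
        exact hxw
      · obtain ⟨w, hw, hlen⟩ := pv_pat_len words pats[pin] (by
          rw [← hpats]; exact List.getElem_mem hpin)
        have hle := hpre yn (List.mem_range.mpr hyn) (yn + k) (List.mem_range.mpr hyk)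
          (by omega) ⟨w, hw, by omega⟩
        rw [List.getD_eq_getElem _ _ hyn] at hle
        omega
    have hV := pv_vcond lines pats[pin].toList xn yn hyn hxlen
    simp only [hV]
    simp only [PySem.Str.len_eq]
    simp only [hH]
    -- assemble: both sides are one update by the concatenated contribution
    have hline : PySem.List.pyGetD lines (yn : Int) "" = lines[yn] := by
      rw [PySem.List.pyGetD_natCast]
      exact List.getD_eq_getElem lines "" hyn
    unfold pvF
    rw [hline]
    simp only [pv_foldl_add_eq_update, pv_update_ite]
    rw [PySem.Set.update_append]
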